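-- pv_equiv track=rewrite | github.com/nducmd/Python-Code-PTIT | LT_day_so_doc_dac.py | count_pythagorean_triplets
-- ===== SOURCE A (Python) =====
-- def count_pythagorean_triplets(N):
--     count = 0
--
--     # Tạo một danh sách chứa bình phương modulo N của từng số nguyên từ 0 đến N-1
--     squares_mod_N = [(i * i) % N for i in range(N)]
--
--     for a in range(1, N):
--         for b in range(a, N):
--             c_square_mod_N = (squares_mod_N[a] + squares_mod_N[b]) % N
--
--             # Tìm c bằng cách kiểm tra nếu c_square_mod_N là bình phương modulo N
--             for c in range(1, N):
--                 if (c * c) % N == c_square_mod_N: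
--                     count += 1
--
--     return count
-- ===== SOURCE B (Python) =====
-- def count_pythagorean_triplets(N):
--     # Counter of residues: csols[r] = number of c in [1, N) with (c*c) % N == r
--     csols = {}
--     for c in range(1, N):
--         r = (c * c) % N
--         csols[r] = csols.get(r, 0) + 1
--
--     squares_mod_N = [(i * i) % N for i in range(N)]
--
--     count = 0
--     for a in range(1, N):
--         for b in range(a, N):
--             count += csols.get((squares_mod_N[a] + squares_mod_N[b]) % N, 0)
--     return count
-- ===== Notes on version B (the rewrite author's own statement) =====
-- stated objective: faster
-- what changed: B precomputes a residue->count dictionary of c-solutions once, replacing A's innermost scan over all c for every (a,b) pair with an O(1) lookup.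
import Mathlib
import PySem

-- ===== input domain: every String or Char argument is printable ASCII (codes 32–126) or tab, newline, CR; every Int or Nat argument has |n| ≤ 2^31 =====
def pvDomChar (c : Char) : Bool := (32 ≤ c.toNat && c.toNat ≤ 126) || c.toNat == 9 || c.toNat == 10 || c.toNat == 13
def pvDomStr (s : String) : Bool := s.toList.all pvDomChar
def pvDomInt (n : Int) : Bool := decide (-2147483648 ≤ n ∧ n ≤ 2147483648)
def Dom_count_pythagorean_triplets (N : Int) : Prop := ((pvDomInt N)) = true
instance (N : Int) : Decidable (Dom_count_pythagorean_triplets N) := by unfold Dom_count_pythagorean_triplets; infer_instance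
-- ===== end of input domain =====

-- B replaces A's innermost scan over all c with one residue→count dictionary built once (O(N^2) vs O(N^3)).

-- ===== PORT A =====
def count_pythagorean_triplets (N : Int) : Int :=
  let squares := (PySem.List.pyRange 0 N 1).map (fun i => PySem.Int.mod (i * i) N)
  (PySem.List.pyRange 1 N 1).foldl (fun count a =>
    (PySem.List.pyRange a N 1).foldl (fun count b =>
      let c_square_mod_N :=
        PySem.Int.mod (PySem.List.pyGetD squares a 0 + PySem.List.pyGetD squares b 0) N
      (PySem.List.pyRange 1 N 1).foldl (fun count c =>
        if PySem.Int.mod (c * c) N == c_square_mod_N then count + 1 else count) count) count) 0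

-- ===== PORT B =====
def count_pythagorean_triplets_alt (N : Int) : Int :=
  let csols : PySem.Dict Int Int :=
    (PySem.List.pyRange 1 N 1).foldl
      (fun d c => d.modify (PySem.Int.mod (c * c) N) 0 (· + 1)) PySem.Dict.empty
  let squares := (PySem.List.pyRange 0 N 1).map (fun i => PySem.Int.mod (i * i) N)
  (PySem.List.pyRange 1 N 1).foldl (fun count a =>
    (PySem.List.pyRange a N 1).foldl (fun count b =>
      count + csols.getD
        (PySem.Int.mod (PySem.List.pyGetD squares a 0 + PySem.List.pyGetD squares b 0) N) 0) count) 0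

-- ===== PRECONDITION & SPEC =====
def Spec_count_pythagorean_triplets (N : Int) (out : Int) : Prop := out = count_pythagorean_triplets_alt N
instance (N : Int) (out : Int) : Decidable (Spec_count_pythagorean_triplets N out) := by unfold Spec_count_pythagorean_triplets; infer_instance

-- ===== CLAIM (what is proved, stated in full; the proofs are below) =====
def Claim_equal_count_pythagorean_triplets : Prop := ∀ (N : Int), Dom_count_pythagorean_triplets N → Spec_count_pythagorean_triplets N (count_pythagorean_triplets N)

-- ===== LEMMAS AND PROOFS =====

-- B's dictionary lookup at r is the number of c in range(1, N) with (c*c) % N == r.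
theorem csols_getD (N r : Int) :
    ((PySem.List.pyRange 1 N 1).foldl
      (fun d c => d.modify (PySem.Int.mod (c * c) N) 0 (· + 1)) PySem.Dict.empty).getD r 0 =
    ((List.count r ((PySem.List.pyRange 1 N 1).map (fun c => PySem.Int.mod (c * c) N)) : Nat) : Int) := by
  rw [← List.foldl_map (f := fun c => PySem.Int.mod (c * c) N)
        (g := fun (d : PySem.Dict Int Int) x => d.modify x 0 (· + 1))]
  rw [PySem.Dict.getD_foldl_modify_add_one]
  simp [PySem.Dict.empty, PySem.Dict.getD, PySem.Dict.get?]

-- A's innermost loop adds exactly that number to its accumulator.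
theorem inner_loop (N r acc : Int) :
    (PySem.List.pyRange 1 N 1).foldl
      (fun count c => if PySem.Int.mod (c * c) N == r then count + 1 else count) acc =
    acc + ((List.count r ((PySem.List.pyRange 1 N 1).map (fun c => PySem.Int.mod (c * c) N)) : Nat) : Int) := by
  rw [PySem.List.foldl_count_if, List.count_eq_countP, List.countP_map]
  rfl

-- ===== VERDICT (by name: the statement is the Claim_ definition above) =====
theorem count_pythagorean_triplets_spec : Claim_equal_count_pythagorean_triplets := by
  intro N _
  unfold Spec_count_pythagorean_triplets count_pythagorean_triplets count_pythagorean_triplets_alt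
  simp only []
  congr 1
  funext count a
  congr 1
  funext count b
  rw [inner_loop, csols_getD]
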